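-- pv_equiv track=rewrite | github.com/M1an7/graduate | computation_time.py | find_coprimes
-- ===== SOURCE A (Python) =====
-- import math
--
-- def find_coprimes(x):
--     coprimes = []
--     product = 1
--     num = 2
--     while product < x:
--         if all(math.gcd(num, cp) == 1 for cp in coprimes):
--             coprimes.append(num)
--             product *= num
--             if product >= x:
--                 break
--         num += 1
--
--     return coprimes
-- ===== SOURCE B (Python) =====
-- def is_prime(num):
--     if num < 2:
--         return False
--     d = 2
--     while d * d <= num:
--         if num % d == 0:
--             return False
--         d += 1
--     return True
--
-- def find_coprimes(x):
--     coprimes = []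
--     product = 1
--     num = 2
--     while product < x:
--         if is_prime(num):
--             coprimes.append(num)
--             product *= num
--             if product >= x:
--                 break
--         num += 1
--     return coprimes
-- ===== Notes on version B (the rewrite author's own statement) =====
-- stated objective: idiomatic
-- what changed: The accept test 'gcd with every previously collected number is 1' (a growing list of gcd calls per candidate) is replaced by a self-contained sqrt-bounded trial-division primality test; since A provably collects exactly the primes, the collected sequence and stopping point are identical.
import Mathlib
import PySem

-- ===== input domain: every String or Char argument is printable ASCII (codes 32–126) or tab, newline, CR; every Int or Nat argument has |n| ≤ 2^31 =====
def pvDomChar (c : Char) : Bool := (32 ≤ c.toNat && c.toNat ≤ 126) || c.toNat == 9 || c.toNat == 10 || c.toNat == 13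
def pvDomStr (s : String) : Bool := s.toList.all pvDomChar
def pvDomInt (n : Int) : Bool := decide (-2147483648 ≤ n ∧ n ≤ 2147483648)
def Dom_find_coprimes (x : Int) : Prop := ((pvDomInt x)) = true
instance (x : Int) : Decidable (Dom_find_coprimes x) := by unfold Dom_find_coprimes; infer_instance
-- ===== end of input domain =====

-- B replaces A's "gcd = 1 with every collected number" accept test by a self-contained
-- sqrt-bounded trial-division primality test (idiomatic; same collected sequence, since
-- A collects exactly the primes).


-- ===== PORT A =====
-- the while loop, fuel-indexed: fuel 100 suffices for every |x| ≤ 2^31 (the product of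
-- the primes up to 29 already exceeds 2^31), so the port is exact on Dom.
def findLoopA (x : Int) : Nat → List Int → Int → Int → List Int
  | 0, coprimes, _, _ => coprimes
  | fuel + 1, coprimes, product, num =>
    if product < x then
      if coprimes.all (fun cp => Int.gcd num cp == 1) then
        if product * num ≥ x then coprimes ++ [num]
        else findLoopA x fuel (coprimes ++ [num]) (product * num) (num + 1)
      else findLoopA x fuel coprimes product (num + 1)
    else coprimes

def find_coprimes (x : Int) : List Int := findLoopA x 100 [] 1 2

-- ===== PORT B =====
-- Source B's is_prime: while d*d <= num, testing num % d == 0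
def isPrimeLoop (num d : Int) : Bool :=
  if _h : d * d ≤ num then
    if PySem.Int.mod num d == 0 then false else isPrimeLoop num (d + 1)
  else true
termination_by (num + 1 - d).toNat
decreasing_by
  have hd : d ≤ d * d := by
    rcases le_or_gt 1 d with h | h
    · nlinarith
    · have h0 : d ≤ 0 := by omega
      clear h
      nlinarith [mul_self_nonneg d]
  omega

def is_prime (num : Int) : Bool :=
  if num < 2 then false else isPrimeLoop num 2

def findLoopB (x : Int) : Nat → List Int → Int → Int → List Int
  | 0, coprimes, _, _ => coprimes
  | fuel + 1, coprimes, product, num =>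
    if product < x then
      if is_prime num then
        if product * num ≥ x then coprimes ++ [num]
        else findLoopB x fuel (coprimes ++ [num]) (product * num) (num + 1)
      else findLoopB x fuel coprimes product (num + 1)
    else coprimes

def find_coprimes_alt (x : Int) : List Int := findLoopB x 100 [] 1 2

-- ===== PRECONDITION & SPEC =====
def Spec_find_coprimes (x : Int) (out : List Int) : Prop := out = find_coprimes_alt x
instance (x : Int) (out : List Int) : Decidable (Spec_find_coprimes x out) := by unfold Spec_find_coprimes; infer_instance

-- ===== CLAIM (what is proved, stated in full; the proofs are below) =====
def Claim_equal_find_coprimes : Prop := ∀ (x : Int), Dom_find_coprimes x → Spec_find_coprimes x (find_coprimes x)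

-- ===== LEMMAS AND PROOFS =====

-- loop invariant: the collected list holds exactly the primes below the current candidate
def PrimeInvariant (c : List Int) (num : Int) : Prop :=
  ∀ m : Int, m ∈ c ↔ (2 ≤ m ∧ m < num ∧ Nat.Prime m.toNat)

lemma isPrimeLoop_iff (num : Int) :
    ∀ (k : Nat) (d : Int), (num + 1 - d).toNat = k → 2 ≤ d →
      (isPrimeLoop num d = true ↔ ∀ e : Int, d ≤ e → e * e ≤ num → ¬ e ∣ num) := by
  intro k
  induction k using Nat.strong_induction_on with
  | _ k ih =>
    intro d hk hd
    rw [isPrimeLoop]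
    by_cases h : d * d ≤ num
    · rw [dif_pos h]
      by_cases hdvd : PySem.Int.mod num d = 0
      · have hdd : d ∣ num := (PySem.Int.mod_eq_zero_iff_dvd num d).mp hdvd
        simp only [hdvd]
        simp only [beq_self_eq_true, if_true]
        constructor
        · intro hf; exact absurd hf (by simp)
        · intro hR; exact absurd hdd (hR d le_rfl h)
      · have hnd : ¬ d ∣ num := fun hc => hdvd ((PySem.Int.mod_eq_zero_iff_dvd num d).mpr hc)
        have hne : (PySem.Int.mod num d == 0) = false := by
          simp [hdvd]
        rw [hne]
        simp only [Bool.false_eq_true, if_false]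
        have hlt : (num + 1 - (d + 1)).toNat < k := by
          have hdn : d ≤ num := by nlinarith
          omega
        rw [ih _ hlt (d + 1) rfl (by omega)]
        constructor
        · intro hR e hde he2
          by_cases hed : e = d
          · subst hed; exact hnd
          · exact hR e (by omega) he2
        · intro hR e hde he2
          exact hR e (by omega) he2
    · rw [dif_neg h]
      simp only [true_iff]
      intro e hde he2 _
      have : d * d ≤ e * e := by nlinarith
      omega

lemma is_prime_iff (num : Int) (hnum : 2 ≤ num) :
    is_prime num = true ↔ Nat.Prime num.toNat := by
  unfold is_prime
  rw [if_neg (by omega)]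
  rw [isPrimeLoop_iff num _ 2 rfl (by omega)]
  constructor
  · intro hR
    rw [Nat.prime_def_le_sqrt]
    refine ⟨by omega, ?_⟩
    intro m hm hms hdvd
    have hmm : m * m ≤ num.toNat := by have h := Nat.le_sqrt'.mp hms; simpa [pow_two] using h
    refine hR (m : Int) (by exact_mod_cast hm) ?_ ?_
    · have : ((m * m : Nat) : Int) ≤ ((num.toNat : Nat) : Int) := by exact_mod_cast hmm
      push_cast at this
      omega
    · have : ((m : Int)) ∣ ((num.toNat : Nat) : Int) := by exact_mod_cast hdvd
      rwa [Int.toNat_of_nonneg (by omega)] at this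
  · intro hp e hde he2 hdvd
    have he0 : 0 ≤ e := by omega
    have hent : (2 : Nat) ≤ e.toNat := by omega
    have hdvdn : e.toNat ∣ num.toNat := by
      have hd2 : e ∣ (num.toNat : Int) := by rwa [Int.toNat_of_nonneg (by omega)]
      rcases hd2 with ⟨c, hc⟩
      rw [Int.toNat_of_nonneg (by omega : (0:Int) ≤ num)] at hc
      have hc0 : 0 ≤ c := by
        rcases le_or_gt 0 c with h | h
        · exact h
        · exfalso; nlinarith
      refine ⟨c.toNat, ?_⟩
      have hgoal : ((num.toNat : Nat) : Int) = ((e.toNat * c.toNat : Nat) : Int) := by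
        push_cast
        rw [Int.toNat_of_nonneg (by omega : (0:Int) ≤ num), Int.toNat_of_nonneg he0,
          Int.toNat_of_nonneg hc0]
        exact hc
      exact_mod_cast hgoal
    rw [Nat.prime_def_le_sqrt] at hp
    refine hp.2 e.toNat hent ?_ hdvdn
    apply Nat.le_sqrt'.mpr
    rw [pow_two]
    have hcast : (e.toNat : Int) * (e.toNat : Int) ≤ (num.toNat : Int) := by
      rw [Int.toNat_of_nonneg he0, Int.toNat_of_nonneg (by omega)]
      exact he2
    exact_mod_cast hcast

lemma condA_iff (c : List Int) (num : Int) (hI : PrimeInvariant c num) (hnum : 2 ≤ num) :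
    (c.all (fun cp => Int.gcd num cp == 1) = true) ↔ Nat.Prime num.toNat := by
  rw [List.all_eq_true]
  constructor
  · intro hall
    by_contra hnp
    have hn2 : 2 ≤ num.toNat := by omega
    have hp : (num.toNat.minFac).Prime := Nat.minFac_prime (by omega)
    have hpd : num.toNat.minFac ∣ num.toNat := Nat.minFac_dvd num.toNat
    have hplt : num.toNat.minFac < num.toNat := by
      rcases lt_or_eq_of_le (Nat.minFac_le (by omega) : num.toNat.minFac ≤ num.toNat) with h | h
      · exact h
      · exact absurd (h ▸ hp) hnp
    have hmem : ((num.toNat.minFac : Nat) : Int) ∈ c := by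
      rw [hI]
      refine ⟨by exact_mod_cast hp.two_le, ?_, by simp [hp]⟩
      have : ((num.toNat.minFac : Nat) : Int) < ((num.toNat : Nat) : Int) := by exact_mod_cast hplt
      omega
    have hgcd := hall _ hmem
    simp only [beq_iff_eq] at hgcd
    have hg : Int.gcd num ((num.toNat.minFac : Nat) : Int) = Nat.gcd num.toNat num.toNat.minFac := by
      have h1 : num.natAbs = num.toNat := by omega
      simp [Int.gcd, h1]
    rw [hg, Nat.gcd_eq_right hpd] at hgcd
    have := hp.two_le
    omega
  · intro hp cp hcp
    rw [hI] at hcp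
    obtain ⟨h2, hlt, hcprime⟩ := hcp
    simp only [beq_iff_eq]
    have hne : num.toNat ≠ cp.toNat := by omega
    have hco : Nat.Coprime num.toNat cp.toNat := (Nat.coprime_primes hp hcprime).mpr hne
    have hg : Int.gcd num cp = Nat.gcd num.toNat cp.toNat := by
      have h1 : num.natAbs = num.toNat := by omega
      have h2 : cp.natAbs = cp.toNat := by omega
      simp [Int.gcd, h1, h2]
    rw [hg]
    exact hco

lemma inv_append (c : List Int) (num : Int) (hI : PrimeInvariant c num)
    (hnum : 2 ≤ num) (hp : Nat.Prime num.toNat) : PrimeInvariant (c ++ [num]) (num + 1) := by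
  intro m
  rw [List.mem_append, List.mem_singleton, hI m]
  constructor
  · rintro (⟨h1, h2, h3⟩ | rfl)
    · exact ⟨h1, by omega, h3⟩
    · exact ⟨hnum, by omega, hp⟩
  · rintro ⟨h1, h2, h3⟩
    by_cases hm : m = num
    · right; exact hm
    · left; exact ⟨h1, by omega, h3⟩

lemma inv_skip (c : List Int) (num : Int) (hI : PrimeInvariant c num)
    (hp : ¬ Nat.Prime num.toNat) : PrimeInvariant c (num + 1) := by
  intro m
  rw [hI]
  constructor
  · rintro ⟨h1, h2, h3⟩; exact ⟨h1, by omega, h3⟩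
  · rintro ⟨h1, h2, h3⟩
    refine ⟨h1, ?_, h3⟩
    by_cases hm : m = num
    · subst hm; exact absurd h3 hp
    · omega

lemma loops_eq (x : Int) :
    ∀ (fuel : Nat) (c : List Int) (p num : Int), 2 ≤ num → PrimeInvariant c num →
      findLoopA x fuel c p num = findLoopB x fuel c p num := by
  intro fuel
  induction fuel with
  | zero => intro c p num _ _; rfl
  | succ n ih =>
    intro c p num hn hI
    simp only [findLoopA, findLoopB]
    by_cases hpx : p < x
    · simp only [hpx, if_true]
      by_cases hA : (c.all (fun cp => Int.gcd num cp == 1)) = true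
      · have hprime : Nat.Prime num.toNat := (condA_iff c num hI hn).mp hA
        have hB : is_prime num = true := (is_prime_iff num hn).mpr hprime
        rw [hA, hB]
        simp only [if_true]
        by_cases hge : p * num ≥ x
        · rw [if_pos hge, if_pos hge]
        · rw [if_neg hge, if_neg hge]
          exact ih (c ++ [num]) (p * num) (num + 1) (by omega)
            (inv_append c num hI hn hprime)
      · have hnprime : ¬ Nat.Prime num.toNat := fun hp => hA ((condA_iff c num hI hn).mpr hp)
        have hB : ¬ is_prime num = true := fun hb => hnprime ((is_prime_iff num hn).mp hb)
        rw [Bool.eq_false_iff.mpr hA, Bool.eq_false_iff.mpr hB]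
        simp only [Bool.false_eq_true, if_false]
        exact ih c p (num + 1) (by omega) (inv_skip c num hI hnprime)
    · simp only [hpx, if_false]

-- ===== VERDICT (by name: the statement is the Claim_ definition above) =====
theorem find_coprimes_spec : Claim_equal_find_coprimes := by
  intro x _
  unfold Spec_find_coprimes find_coprimes find_coprimes_alt
  exact loops_eq x 100 [] 1 2 (by norm_num) (by intro m; simp; intro h1 h2; exact absurd h2 (by omega))
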